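-- pv_equiv track=rewrite | github.com/analogdevicesinc/rips-2024 | dock5-fpga-ramdebug-testing/python/TorqueFluxSystemIDTuningClass.py | find_positive_inertia_region
-- ===== SOURCE A (Python) =====
-- def find_positive_inertia_region(iq_inc, iq_dec):
--     """ Find the longest region that could generate positive inertia estimation. """
--     start_pt_list = []
--     end_pt_list = []
--
--     N = len(iq_inc)
--     valid_region = False
--     for i in range(N):
--         if valid_region and iq_inc[i] < iq_dec[i]:
--             end_pt_list.append(i)
--             valid_region = False
--         elif (not valid_region) and iq_inc[i] > iq_dec[i]:
--             start_pt_list.append(i)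
--             valid_region = True
--
--     if len(end_pt_list) < len(start_pt_list):
--         end_pt_list.append(N)
--
--     longest_region = 0
--     for i in range(len(start_pt_list)):
--         if end_pt_list[i] - start_pt_list[i] > longest_region:
--             longest_region = end_pt_list[i] - start_pt_list[i]
--             start_pt = start_pt_list[i]
--             end_pt = end_pt_list[i]
--
--     return start_pt, end_pt
-- ===== SOURCE B (Python) =====
-- def find_positive_inertia_region(iq_inc, iq_dec):
--     """Single linear pass: track the currently open region and the best region seen so far."""
--     best = 0
--     in_region = False
--     start = 0
--     for i, (inc, dec) in enumerate(zip(iq_inc, iq_dec)):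
--         if in_region:
--             if inc < dec:
--                 if i - start > best:
--                     best = i - start
--                     start_pt, end_pt = start, i
--                 in_region = False
--         elif inc > dec:
--             in_region = True
--             start = i
--     if in_region and len(iq_inc) - start > best:
--         start_pt, end_pt = start, len(iq_inc)
--     return start_pt, end_pt
-- ===== Notes on version B (the rewrite author's own statement) =====
-- stated objective: simpler
-- what changed: Replaces A's two-phase design (first loop collecting start/end point lists plus a closing append, then a second indexed loop over those lists to pick the longest) by one linear pass over zip(iq_inc, iq_dec) that tracks the currently open region and the best region directly, with no intermediate lists.
import Mathlib
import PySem

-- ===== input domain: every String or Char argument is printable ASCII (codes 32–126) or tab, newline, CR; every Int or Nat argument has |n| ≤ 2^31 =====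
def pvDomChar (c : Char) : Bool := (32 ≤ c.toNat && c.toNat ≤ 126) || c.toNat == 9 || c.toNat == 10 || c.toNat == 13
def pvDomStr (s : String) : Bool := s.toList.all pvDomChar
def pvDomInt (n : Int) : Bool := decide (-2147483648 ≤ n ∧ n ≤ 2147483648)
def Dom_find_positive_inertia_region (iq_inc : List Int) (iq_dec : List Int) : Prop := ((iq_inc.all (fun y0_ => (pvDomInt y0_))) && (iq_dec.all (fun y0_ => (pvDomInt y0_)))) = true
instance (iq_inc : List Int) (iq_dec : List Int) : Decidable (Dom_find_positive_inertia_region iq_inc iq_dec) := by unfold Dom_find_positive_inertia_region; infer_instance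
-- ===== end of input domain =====

-- B replaces A's two-phase scheme (collect start/end lists, then rescan them for the longest
-- region) by a single pass that tracks the open region and the best region directly: simpler.

-- ===== PORT A =====
-- first Python loop: `for i in range(N)` with state (start_pt_list, end_pt_list, valid_region).
-- iq_inc[i]/iq_dec[i] via pyGet?; the `.getD 0` default is reached only when iq_dec is shorter
-- than iq_inc, where Python raises IndexError (excluded by Pre_).
def fpirLoop1 (inc dec : List Int) (i : Nat) (ss es : List Int) (valid : Bool) :
    List Int × List Int × Bool :=
  if h : i < inc.length then
    let a := (PySem.List.pyGet? inc (i : Int)).getD 0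
    let b := (PySem.List.pyGet? dec (i : Int)).getD 0
    if valid then
      if a < b then fpirLoop1 inc dec (i+1) ss (es ++ [(i : Int)]) false
      else fpirLoop1 inc dec (i+1) ss es valid
    else
      if a > b then fpirLoop1 inc dec (i+1) (ss ++ [(i : Int)]) es true
      else fpirLoop1 inc dec (i+1) ss es valid
  else (ss, es, valid)
termination_by inc.length - i

-- second Python loop: `for i in range(len(start_pt_list))` reading both lists at i; after the
-- close the two lists have equal length, so it is the lockstep walk below.  The Option is the
-- possibly-unbound (start_pt, end_pt) pair.
def fpirLoop2 : List Int → List Int → Int → Option (Int × Int) → Int × Option (Int × Int)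
  | s :: ss, e :: es, longest, res =>
    if e - s > longest then fpirLoop2 ss es (e - s) (some (s, e))
    else fpirLoop2 ss es longest res
  | _, _, longest, res => (longest, res)

def find_positive_inertia_region (iq_inc : List Int) (iq_dec : List Int) : Int × Int :=
  let N : Int := iq_inc.length
  let r := fpirLoop1 iq_inc iq_dec 0 [] [] false
  let es := if r.2.1.length < r.1.length then r.2.1 ++ [N] else r.2.1
  -- Python raises UnboundLocalError when no region was recorded (excluded by Pre_): default (0,0)
  ((fpirLoop2 r.1 es 0 none).2).getD (0, 0)

-- ===== PORT B =====
-- Source B's single pass over enumerate(zip(iq_inc, iq_dec)) with state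
-- (in_region, start, best, (start_pt, end_pt) as an Option since possibly unbound).
def fpirAltLoop : List (Int × Int) → Int → Bool → Int → Int → Option (Int × Int) →
    Bool × Int × Int × Option (Int × Int)
  | [], _, inr, start, best, res => (inr, start, best, res)
  | (a, b) :: rest, i, inr, start, best, res =>
    if inr then
      if a < b then
        if i - start > best then fpirAltLoop rest (i+1) false start (i - start) (some (start, i))
        else fpirAltLoop rest (i+1) false start best res
      else fpirAltLoop rest (i+1) inr start best res
    else
      if a > b then fpirAltLoop rest (i+1) true i best res
      else fpirAltLoop rest (i+1) inr start best res

def find_positive_inertia_region_alt (iq_inc : List Int) (iq_dec : List Int) : Int × Int :=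
  let N : Int := iq_inc.length
  let r := fpirAltLoop (iq_inc.zip iq_dec) 0 false 0 0 none
  let res := if r.1 then (if N - r.2.1 > r.2.2.1 then some (r.2.1, N) else r.2.2.2) else r.2.2.2
  -- Python raises UnboundLocalError when res is none (excluded by Pre_): default (0,0)
  res.getD (0, 0)

-- ===== PRECONDITION & SPEC =====
-- Pre_ is exactly where Python A returns: A raises IndexError when iq_dec is shorter than
-- iq_inc, and UnboundLocalError when no index has iq_inc[i] > iq_dec[i] (no region exists).
def Pre_find_positive_inertia_region (iq_inc : List Int) (iq_dec : List Int) : Prop :=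
  iq_inc.length ≤ iq_dec.length ∧ ∃ p ∈ iq_inc.zip iq_dec, p.1 > p.2
instance (iq_inc : List Int) (iq_dec : List Int) : Decidable (Pre_find_positive_inertia_region iq_inc iq_dec) := by unfold Pre_find_positive_inertia_region; infer_instance
def pvWitness_find_positive_inertia_region : List Int × List Int := ([1, 0], [0, 1])

def Spec_find_positive_inertia_region (iq_inc : List Int) (iq_dec : List Int) (out : Int × Int) : Prop := out = find_positive_inertia_region_alt iq_inc iq_dec
instance (iq_inc : List Int) (iq_dec : List Int) (out : Int × Int) : Decidable (Spec_find_positive_inertia_region iq_inc iq_dec out) := by unfold Spec_find_positive_inertia_region; infer_instance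

-- ===== CLAIM (what is proved, stated in full; the proofs are below) =====
def Claim_equal_find_positive_inertia_region : Prop := ∀ (iq_inc : List Int) (iq_dec : List Int), Dom_find_positive_inertia_region iq_inc iq_dec → Pre_find_positive_inertia_region iq_inc iq_dec → Spec_find_positive_inertia_region iq_inc iq_dec (find_positive_inertia_region iq_inc iq_dec)

-- ===== LEMMAS AND PROOFS =====

-- the best-region update of A's second loop / B's close, as a fold step
def pvStep (acc : Int × Option (Int × Int)) (p : Int × Int) : Int × Option (Int × Int) :=
  if p.2 - p.1 > acc.1 then (p.2 - p.1, some (p.1, p.2)) else acc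

-- A's first loop rewritten over the zipped pairs with an Int index
def pvZipA : List (Int × Int) → Int → List Int → List Int → Bool → List Int × List Int × Bool
  | [], _, ss, es, v => (ss, es, v)
  | (a, b) :: rest, i, ss, es, v =>
    if v then
      if a < b then pvZipA rest (i+1) ss (es ++ [i]) false
      else pvZipA rest (i+1) ss es v
    else
      if a > b then pvZipA rest (i+1) (ss ++ [i]) es true
      else pvZipA rest (i+1) ss es v

-- the common recursive specification both ports reduce to
def pvF (N : Int) : List (Int × Int) → Int → Bool → Int → Int × Option (Int × Int) →
    Int × Option (Int × Int)
  | [], _, v, s, acc => if v then pvStep acc (s, N) else acc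
  | (a, b) :: rest, i, v, s, acc =>
    if v then
      if a < b then pvF N rest (i+1) false s (pvStep acc (s, i))
      else pvF N rest (i+1) true s acc
    else
      if a > b then pvF N rest (i+1) true i acc
      else pvF N rest (i+1) false s acc

-- region list produced from a mid-loop state (pending start s when v)
def pvRegions (N : Int) (pairs : List (Int × Int)) (i : Int) (v : Bool) (s : Int) :
    List (Int × Int) :=
  let r := pvZipA pairs i [] [] v
  List.zip ((if v then [s] else []) ++ r.1) (r.2.1 ++ (if r.2.2 then [N] else []))

def pvFinish (N : Int) (st : Bool × Int × Int × Option (Int × Int)) : Int × Option (Int × Int) :=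
  if st.1 then pvStep (st.2.2.1, st.2.2.2) (st.2.1, N) else (st.2.2.1, st.2.2.2)

theorem loop2_eq_foldl : ∀ (ss es : List Int) (l : Int) (r : Option (Int × Int)),
    fpirLoop2 ss es l r = List.foldl pvStep (l, r) (ss.zip es) := by
  intro ss
  induction ss with
  | nil => intro es l r; cases es <;> simp [fpirLoop2]
  | cons s ss ih =>
    intro es l r
    cases es with
    | nil => simp [fpirLoop2]
    | cons e es =>
      by_cases hgt : e - s > l <;> simp [fpirLoop2, hgt, pvStep, ih]

theorem zipA_acc : ∀ (pairs : List (Int × Int)) (i : Int) (ss es : List Int) (v : Bool),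
    pvZipA pairs i ss es v =
      (ss ++ (pvZipA pairs i [] [] v).1, es ++ (pvZipA pairs i [] [] v).2.1,
        (pvZipA pairs i [] [] v).2.2) := by
  intro pairs
  induction pairs with
  | nil => intro i ss es v; simp [pvZipA]
  | cons p rest ih =>
    intro i ss es v
    obtain ⟨a, b⟩ := p
    cases v with
    | true =>
      by_cases hab : a < b
      · rw [show pvZipA ((a,b)::rest) i ss es true = pvZipA rest (i+1) ss (es ++ [i]) false from
              by simp [pvZipA, hab],
            show pvZipA ((a,b)::rest) i [] [] true = pvZipA rest (i+1) [] [i] false from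
              by simp [pvZipA, hab]]
        rw [ih (i+1) ss (es ++ [i]) false, ih (i+1) [] [i] false]
        simp
      · rw [show pvZipA ((a,b)::rest) i ss es true = pvZipA rest (i+1) ss es true from
              by simp [pvZipA, hab],
            show pvZipA ((a,b)::rest) i [] [] true = pvZipA rest (i+1) [] [] true from
              by simp [pvZipA, hab]]
        exact ih (i+1) ss es true
    | false =>
      by_cases hab : a > b
      · rw [show pvZipA ((a,b)::rest) i ss es false = pvZipA rest (i+1) (ss ++ [i]) es true from
              by simp [pvZipA, hab],
            show pvZipA ((a,b)::rest) i [] [] false = pvZipA rest (i+1) [i] [] true from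
              by simp [pvZipA, hab]]
        rw [ih (i+1) (ss ++ [i]) es true, ih (i+1) [i] [] true]
        simp
      · rw [show pvZipA ((a,b)::rest) i ss es false = pvZipA rest (i+1) ss es false from
              by simp [pvZipA, hab],
            show pvZipA ((a,b)::rest) i [] [] false = pvZipA rest (i+1) [] [] false from
              by simp [pvZipA, hab]]
        exact ih (i+1) ss es false

theorem zipA_bal : ∀ (pairs : List (Int × Int)) (i : Int) (ss es : List Int) (v : Bool),
    (pvZipA pairs i ss es v).1.length + es.length + (cond v 1 0) =
      (pvZipA pairs i ss es v).2.1.length + ss.length + (cond (pvZipA pairs i ss es v).2.2 1 0) := by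
  intro pairs
  induction pairs with
  | nil => intro i ss es v; cases v <;> simp [pvZipA] <;> omega
  | cons p rest ih =>
    intro i ss es v
    obtain ⟨a, b⟩ := p
    cases v with
    | true =>
      by_cases hab : a < b
      · have := ih (i+1) ss (es ++ [i]) false
        simp only [show pvZipA ((a,b)::rest) i ss es true = pvZipA rest (i+1) ss (es ++ [i]) false
          from by simp [pvZipA, hab]]
        simp [List.length_append] at this ⊢
        omega
      · have := ih (i+1) ss es true
        simpa [pvZipA, hab] using this
    | false =>
      by_cases hab : a > b
      · have := ih (i+1) (ss ++ [i]) es true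
        simp only [show pvZipA ((a,b)::rest) i ss es false = pvZipA rest (i+1) (ss ++ [i]) es true
          from by simp [pvZipA, hab]]
        simp [List.length_append] at this ⊢
        omega
      · have := ih (i+1) ss es false
        simpa [pvZipA, hab] using this

theorem regions_foldl (N : Int) : ∀ (pairs : List (Int × Int)) (i : Int) (v : Bool) (s : Int)
    (acc : Int × Option (Int × Int)),
    List.foldl pvStep acc (pvRegions N pairs i v s) = pvF N pairs i v s acc := by
  intro pairs
  induction pairs with
  | nil =>
    intro i v s acc
    cases v <;> simp [pvRegions, pvZipA, pvF]
  | cons p rest ih =>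
    intro i v s acc
    obtain ⟨a, b⟩ := p
    cases v with
    | true =>
      by_cases hab : a < b
      · have hr : pvRegions N ((a,b)::rest) i true s = (s, i) :: pvRegions N rest (i+1) false s := by
          simp only [pvRegions, show pvZipA ((a,b)::rest) i [] [] true =
            pvZipA rest (i+1) [] [i] false from by simp [pvZipA, hab]]
          rw [zipA_acc rest (i+1) [] [i] false]
          simp
        rw [hr]
        simp only [List.foldl_cons]
        rw [ih (i+1) false s (pvStep acc (s, i))]
        simp [pvF, hab]
      · have hr : pvRegions N ((a,b)::rest) i true s = pvRegions N rest (i+1) true s := by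
          simp [pvRegions, pvZipA, hab]
        rw [hr, ih (i+1) true s acc]
        simp [pvF, hab]
    | false =>
      by_cases hab : a > b
      · have hr : pvRegions N ((a,b)::rest) i false s = pvRegions N rest (i+1) true i := by
          simp only [pvRegions, show pvZipA ((a,b)::rest) i [] [] false =
            pvZipA rest (i+1) [i] [] true from by simp [pvZipA, hab]]
          rw [zipA_acc rest (i+1) [i] [] true]
          simp
        rw [hr, ih (i+1) true i acc]
        simp [pvF, hab]
      · have hr : pvRegions N ((a,b)::rest) i false s = pvRegions N rest (i+1) false s := by
          simp [pvRegions, pvZipA, hab]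
        rw [hr, ih (i+1) false s acc]
        simp [pvF, hab]

theorem alt_F (N : Int) : ∀ (pairs : List (Int × Int)) (i : Int) (v : Bool) (s best : Int)
    (res : Option (Int × Int)),
    pvFinish N (fpirAltLoop pairs i v s best res) = pvF N pairs i v s (best, res) := by
  intro pairs
  induction pairs with
  | nil => intro i v s best res; cases v <;> simp [fpirAltLoop, pvF, pvFinish, pvStep]
  | cons p rest ih =>
    intro i v s best res
    obtain ⟨a, b⟩ := p
    cases v with
    | true =>
      by_cases hab : a < b
      · by_cases hgt : i - s > best <;>
          simp [fpirAltLoop, pvF, hab, hgt, pvStep, ih]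
      · simp [fpirAltLoop, pvF, hab, ih]
    | false =>
      by_cases hab : a > b
      · simp [fpirAltLoop, pvF, hab, ih]
      · simp [fpirAltLoop, pvF, hab, ih]

theorem loop1_zipA (inc dec : List Int) (h : inc.length ≤ dec.length) :
    ∀ (k i : Nat) (ss es : List Int) (v : Bool), inc.length - i ≤ k →
      fpirLoop1 inc dec i ss es v = pvZipA ((inc.zip dec).drop i) (i : Int) ss es v := by
  intro k
  induction k with
  | zero =>
    intro i ss es v hk
    have hi : ¬ i < inc.length := by omega
    rw [fpirLoop1, dif_neg hi]
    rw [List.drop_eq_nil_of_le (by simp [List.length_zip]; omega)]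
    simp [pvZipA]
  | succ k ih =>
    intro i ss es v hk
    by_cases hi : i < inc.length
    · have hid : i < dec.length := by omega
      have hz : i < (inc.zip dec).length := by simp [List.length_zip]; omega
      have ha : (PySem.List.pyGet? inc (i : Int)).getD 0 = inc[i] := by
        simp [PySem.List.pyGet?_natCast, List.getElem?_eq_getElem hi]
      have hb : (PySem.List.pyGet? dec (i : Int)).getD 0 = dec[i] := by
        simp [PySem.List.pyGet?_natCast, List.getElem?_eq_getElem hid]
      rw [fpirLoop1, dif_pos hi]
      rw [List.drop_eq_getElem_cons hz]
      simp only [List.getElem_zip]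
      simp only [ha, hb, pvZipA]
      have hrec := fun ss es v => ih (i+1) ss es v (by omega)
      simp only [Nat.cast_add, Nat.cast_one] at hrec
      cases v with
      | true =>
        by_cases hab : inc[i] < dec[i] <;>
          simp [hab, hrec]
      | false =>
        by_cases hab : inc[i] > dec[i] <;>
          simp [hab, hrec]
    · rw [fpirLoop1, dif_neg hi]
      rw [List.drop_eq_nil_of_le (by simp [List.length_zip]; omega)]
      simp [pvZipA]

-- ===== VERDICT (by name: the statement is the Claim_ definition above) =====
theorem find_positive_inertia_region_spec : Claim_equal_find_positive_inertia_region := by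
  intro inc dec _ pre
  obtain ⟨hlen, -⟩ := pre
  show find_positive_inertia_region inc dec = find_positive_inertia_region_alt inc dec
  simp only [find_positive_inertia_region, find_positive_inertia_region_alt]
  have h1 : fpirLoop1 inc dec 0 [] [] false = pvZipA (inc.zip dec) 0 [] [] false := by
    simpa using loop1_zipA inc dec hlen inc.length 0 [] [] false (by omega)
  rw [h1]
  set N : Int := (inc.length : Int) with hN
  set X := pvZipA (inc.zip dec) 0 [] [] false with hX
  have hbal := zipA_bal (inc.zip dec) 0 [] [] false
  rw [← hX] at hbal
  have hif : (if X.2.1.length < X.1.length then X.2.1 ++ [N] else X.2.1) =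
      X.2.1 ++ (if X.2.2 then [N] else []) := by
    cases hx : X.2.2 <;> rw [hx] at hbal <;> simp at hbal ⊢ <;> omega
  rw [hif, loop2_eq_foldl]
  have hreg : X.1.zip (X.2.1 ++ (if X.2.2 then [N] else [])) = pvRegions N (inc.zip dec) 0 false 0 := by
    simp [pvRegions, ← hX]
  rw [hreg, regions_foldl, ← alt_F]
  rcases fpirAltLoop (inc.zip dec) 0 false 0 0 none with ⟨inr, st, best, res⟩
  cases inr <;> by_cases hgt : N - st > best <;> simp [pvFinish, pvStep, hgt]
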